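-- pv_equiv track=rewrite | github.com/yjsayya/Algorithms | 1. Programmers/lv2/lv2(정답률60%이상)/lv2_의상.py | solution
-- ===== SOURCE A (Python) =====
-- from itertools import combinations as comb
--
-- def solution(clothes):
--
--     dic = dict()
--     cnt = 0
--     li = []
--
--     for i,j in clothes:
--         if j in dic:
--             dic[j] += 1
--             continue
--         dic[j] = 1
--
--     for k in dic.values():
--         li.append(k)
--
--     for l in range(1,len(li)+1):
--         tot = 0
--         for m in comb(li,l):
--             mul = 1
--             for n in m:
--                 mul *= n
--             tot += mul
--         cnt += tot
--
--     return cnt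
-- ===== SOURCE B (Python) =====
-- def solution(clothes):
--     counts = {}
--     for _, cat in clothes:
--         counts[cat] = counts.get(cat, 0) + 1
--     prod = 1
--     for v in counts.values():
--         prod *= v + 1
--     return prod - 1
-- ===== Notes on version B (the rewrite author's own statement) =====
-- stated objective: faster
-- what changed: Replaced the sum over all combinations of category counts (elementary symmetric polynomials of every order) with the closed form: product of (count_i + 1) over categories, minus 1.
import Mathlib
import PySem

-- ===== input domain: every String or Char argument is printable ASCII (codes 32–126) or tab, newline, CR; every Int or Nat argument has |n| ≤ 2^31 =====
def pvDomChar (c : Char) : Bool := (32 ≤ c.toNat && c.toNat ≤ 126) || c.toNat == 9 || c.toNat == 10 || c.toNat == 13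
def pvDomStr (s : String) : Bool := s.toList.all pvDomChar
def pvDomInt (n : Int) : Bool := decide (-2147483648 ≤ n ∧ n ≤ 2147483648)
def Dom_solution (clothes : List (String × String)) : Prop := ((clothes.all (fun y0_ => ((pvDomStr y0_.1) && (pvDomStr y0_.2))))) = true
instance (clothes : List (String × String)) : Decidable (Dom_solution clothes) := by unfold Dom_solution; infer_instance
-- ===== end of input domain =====

-- B replaces A's sum over all combinations of category counts with the closed
-- form  prod (count_i + 1) - 1  over the categories (asymptotically faster).

-- ===== PORT A =====
-- itertools.combinations over a list of counts, in Python's emission order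
def pyComb (xs : List Int) : Nat → List (List Int)
  | 0 => [[]]
  | l + 1 =>
    match xs with
    | [] => []
    | x :: rest => (pyComb rest l).map (fun m => x :: m) ++ pyComb rest (l + 1)

def solution (clothes : List (String × String)) : Int :=
  -- for i,j in clothes: if j in dic: dic[j] += 1; continue; dic[j] = 1
  let dic := clothes.foldl
    (fun d p => if d.contains p.2 then d.modify p.2 0 (· + 1) else d.insert p.2 1)
    PySem.Dict.empty
  -- for k in dic.values(): li.append(k)
  let li := dic.values.foldl (fun acc k => acc ++ [k]) []
  -- for l in range(1, len(li)+1): tot = 0; for m in comb(li, l): …; cnt += tot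
  (PySem.List.pyRange 1 ((li.length : Int) + 1) 1).foldl
    (fun cnt l =>
      let tot := (pyComb li l.toNat).foldl
        (fun tot m => tot + m.foldl (fun mul n => mul * n) 1) 0
      cnt + tot) 0

-- ===== PORT B =====
def solution_alt (clothes : List (String × String)) : Int :=
  let counts := clothes.foldl
    (fun d p => d.insert p.2 (d.getD p.2 0 + 1)) PySem.Dict.empty
  counts.values.foldl (fun prod v => prod * (v + 1)) 1 - 1

-- ===== PRECONDITION & SPEC =====
def Spec_solution (clothes : List (String × String)) (out : Int) : Prop := out = solution_alt clothes
instance (clothes : List (String × String)) (out : Int) : Decidable (Spec_solution clothes out) := by unfold Spec_solution; infer_instance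

-- ===== CLAIM (what is proved, stated in full; the proofs are below) =====
def Claim_equal_solution : Prop := ∀ (clothes : List (String × String)), Dom_solution clothes → Spec_solution clothes (solution clothes)

-- ===== LEMMAS AND PROOFS =====

-- A's counting loop builds collections.Counter of the categories
theorem dicA_eq_counter (clothes : List (String × String)) :
    clothes.foldl
      (fun d p => if d.contains p.2 then d.modify p.2 0 (· + 1) else d.insert p.2 1)
      PySem.Dict.empty
    = PySem.Dict.counter (clothes.map (·.2)) := by
  rw [PySem.Dict.counter_eq_foldl, List.foldl_map]
  apply PySem.List.foldl_congr_mem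
  intro d p _
  by_cases h : d.contains p.2
  · simp [h]
  · simp only [h, if_neg Bool.false_ne_true]
    simp [PySem.Dict.modify, PySem.Dict.getD_of_not_contains d 0 (by simpa using h)]

-- B's counting loop builds the same Counter
theorem dicB_eq_counter (clothes : List (String × String)) :
    clothes.foldl
      (fun d p => d.insert p.2 (d.getD p.2 0 + 1)) PySem.Dict.empty
    = PySem.Dict.counter (clothes.map (·.2)) := by
  rw [← PySem.Dict.foldl_insert_getD_add_one_eq_counter, List.foldl_map]

-- sum of products of the tuples emitted by combinations(xs, l)
def sp (L : List (List Int)) : Int := (L.map (fun m => m.foldl (fun mul n => mul * n) 1)).sum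

theorem sp_eq (L : List (List Int)) : sp L = (L.map List.prod).sum := by
  unfold sp
  congr 1
  apply List.map_congr_left
  intro m _
  rw [List.prod_eq_foldl]

theorem sp_append (L1 L2 : List (List Int)) : sp (L1 ++ L2) = sp L1 + sp L2 := by
  simp [sp]

theorem sp_map_cons (x : Int) (L : List (List Int)) : sp (L.map (fun m => x :: m)) = x * sp L := by
  simp only [sp_eq, List.map_map]
  induction L with
  | nil => simp
  | cons m L ih => simp [ih]; ring

theorem pyComb_overlong (xs : List Int) (l : Nat) (h : xs.length < l) : pyComb xs l = [] := by
  induction xs generalizing l with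
  | nil => cases l with
    | zero => omega
    | succ l => rfl
  | cons x rest ih =>
    cases l with
    | zero => omega
    | succ l =>
      simp at h
      simp [pyComb, ih l (by omega), ih (l+1) (by omega)]

-- the combination identity:  sum over l = 0..n of e_l(xs)  =  prod (x+1)
theorem comb_sum (xs : List Int) :
    ((List.range (xs.length + 1)).map (fun l => sp (pyComb xs l))).sum
      = (xs.map (fun x => x + 1)).prod := by
  induction xs with
  | nil => simp [sp, pyComb]
  | cons x rest ih =>
    rw [List.length_cons, List.range_succ_eq_map]
    simp only [List.map_cons, List.map_map, List.sum_cons]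
    have hstep : ∀ l : Nat, sp (pyComb (x :: rest) (l + 1))
        = x * sp (pyComb rest l) + sp (pyComb rest (l + 1)) := by
      intro l
      simp [pyComb, sp_append, sp_map_cons]
    have h1 : ((List.range (rest.length + 1)).map
        ((fun l => sp (pyComb (x :: rest) l)) ∘ Nat.succ)).sum
        = x * ((List.range (rest.length + 1)).map (fun l => sp (pyComb rest l))).sum
          + ((List.range (rest.length + 1)).map (fun l => sp (pyComb rest (l + 1)))).sum := by
      simp only [Function.comp_def]
      rw [show (fun l => sp (pyComb (x :: rest) (l + 1)))
          = fun l => x * sp (pyComb rest l) + sp (pyComb rest (l + 1)) from funext hstep]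
      rw [PySem.List.sum_map_add_int]
      congr 1
      induction (List.range (rest.length + 1)) with
      | nil => simp
      | cons a L ihL => simp [ihL]; ring
    have h2 : ((List.range (rest.length + 1)).map (fun l => sp (pyComb rest (l + 1)))).sum
        = ((List.range (rest.length + 1)).map (fun l => sp (pyComb rest l))).sum - 1 := by
      calc ((List.range (rest.length + 1)).map (fun l => sp (pyComb rest (l + 1)))).sum
          = ((List.range (rest.length + 2)).map (fun l => sp (pyComb rest l))).sum - 1 := by
            rw [show List.range (rest.length + 2) = 0 :: List.map Nat.succ (List.range (rest.length+1)) from List.range_succ_eq_map]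
            simp only [List.map_cons, List.sum_cons, List.map_map, Function.comp_def,
              Nat.succ_eq_add_one]
            have h0 : sp (pyComb rest 0) = 1 := by simp [pyComb, sp]
            rw [h0]; ring
        _ = ((List.range (rest.length + 1)).map (fun l => sp (pyComb rest l))).sum - 1 := by
            rw [List.range_succ]
            simp [pyComb_overlong rest (rest.length + 1) (by omega), sp]
    rw [h1, h2, ih]
    have : sp (pyComb (x :: rest) 0) = 1 := by simp [pyComb, sp]
    rw [this]
    simp only [List.prod_cons]
    ring

-- A's combination loop over any list of counts equals B's product loop minus 1
theorem main_lemma (li : List Int) :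
    (PySem.List.pyRange 1 ((li.length : Int) + 1) 1).foldl
      (fun cnt l =>
        let tot := (pyComb li l.toNat).foldl
          (fun tot m => tot + m.foldl (fun mul n => mul * n) 1) 0
        cnt + tot) 0
    = li.foldl (fun prod v => prod * (v + 1)) 1 - 1 := by
  have hinner : ∀ l : Int, (pyComb li l.toNat).foldl
      (fun tot m => tot + m.foldl (fun mul n => mul * n) 1) 0 = sp (pyComb li l.toNat) := by
    intro l
    rw [PySem.List.foldl_add]
    simp [sp]
  simp only [hinner]
  rw [PySem.List.foldl_add]
  rw [PySem.List.pyRange_one]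
  have hlen : (((li.length : Int) + 1) - 1).toNat = li.length := by omega
  rw [hlen, List.map_map]
  have hfn : ((fun l : Int => sp (pyComb li l.toNat)) ∘ (fun k : Nat => (1 : Int) + k))
      = fun k : Nat => sp (pyComb li (k + 1)) := by
    funext k
    have h : ((1 : Int) + (k : Int)).toNat = k + 1 := by omega
    simp only [Function.comp_def, h]
  rw [hfn]
  have hr : li.foldl (fun prod v => prod * (v + 1)) 1 = (li.map (fun x => x + 1)).prod := by
    rw [List.prod_eq_foldl, List.foldl_map]
  rw [hr, ← comb_sum li]
  rw [List.range_succ_eq_map]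
  simp only [List.map_cons, List.sum_cons, List.map_map, Function.comp_def, Nat.succ_eq_add_one]
  have h0 : sp (pyComb li 0) = 1 := by simp [pyComb, sp]
  rw [h0]; ring

-- ===== VERDICT (by name: the statement is the Claim_ definition above) =====
theorem solution_spec : Claim_equal_solution := by
  intro clothes _
  unfold Spec_solution solution solution_alt
  simp only [dicA_eq_counter, dicB_eq_counter,
    PySem.List.foldl_append_singleton_eq_self, List.nil_append]
  exact main_lemma _
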